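-- pv_equiv track=rewrite | github.com/dayeonkimm/CodingTest_Practice | Python3/프로그래머스/0/181881. 조건에 맞게 수열 변환하기 2/조건에 맞게 수열 변환하기 2.py | solution
-- ===== SOURCE A (Python) =====
-- def solution(arr):
--     answer = 0
--     q=1
--     while q>0:
--         q=0
--         for i in range(len(arr)):
--             if arr[i]>=50 and arr[i]%2==0:
--                 new=arr[i]//2
--                 q+=1
--                 arr[i]=new
--             elif arr[i]<50 and arr[i]%2!=0:
--                 new=arr[i]*2+1
--                 q+=1
--                 arr[i]=new
--         answer+=1
--     return answer-1
-- ===== SOURCE B (Python) =====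
-- def solution(arr):
--     # per-element stabilization counts; answer = max over elements (0 for empty)
--     best = 0
--     for x in arr:
--         k = 0
--         while True:
--             if x >= 50 and x % 2 == 0:
--                 y = x // 2
--             elif x < 50 and x % 2 != 0:
--                 y = 2 * x + 1
--             else:
--                 y = x
--             if y == x:
--                 break
--             x = y
--             k += 1
--         best = max(best, k)
--     return best
-- ===== Notes on version B (the rewrite author's own statement) =====
-- stated objective: alternative
-- what changed: Instead of repeatedly re-scanning the whole array pass after pass until a pass changes nothing, B computes for each element independently its number of steps to stabilize and returns the maximum, so stabilized elements are never revisited.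
import Mathlib
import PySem

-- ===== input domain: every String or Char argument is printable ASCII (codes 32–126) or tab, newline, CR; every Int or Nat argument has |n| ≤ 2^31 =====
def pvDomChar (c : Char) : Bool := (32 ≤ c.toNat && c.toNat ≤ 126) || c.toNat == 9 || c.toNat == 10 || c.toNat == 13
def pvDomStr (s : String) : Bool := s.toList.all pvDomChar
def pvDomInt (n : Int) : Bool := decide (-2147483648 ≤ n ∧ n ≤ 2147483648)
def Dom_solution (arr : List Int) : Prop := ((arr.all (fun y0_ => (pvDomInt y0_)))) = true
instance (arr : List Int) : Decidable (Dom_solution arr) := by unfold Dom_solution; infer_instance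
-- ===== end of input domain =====

-- B replaces A's repeated whole-array passes by one independent per-element
-- stabilization count, returning the maximum (objective: alternative algorithm).
-- Equivalence is about the RETURN value only: A mutates its argument in place, B does not.

-- ===== PORT A =====
-- one pass of A's inner 'for i in range(len(arr))' loop: each index is updated
-- independently, ported as structural recursion returning (new array, q)
def aPass : List Int → List Int × Int
  | [] => ([], 0)
  | x :: xs =>
    let (ys, q) := aPass xs
    if x ≥ 50 ∧ PySem.Int.mod x 2 = 0 then (PySem.Int.floordiv x 2 :: ys, q + 1)
    else if x < 50 ∧ PySem.Int.mod x 2 ≠ 0 then ((2 * x + 1) :: ys, q + 1)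
    else (x :: ys, q)

-- A's 'while q > 0' loop; fuel only makes it total (under Pre_solution at most
-- 39 passes change anything, proved below, so fuel 100 is never exhausted)
def aLoop : Nat → List Int → Int → Int
  | 0, _, answer => answer - 1
  | fuel + 1, arr, answer =>
    let (arr', q) := aPass arr
    if q > 0 then aLoop fuel arr' (answer + 1) else (answer + 1) - 1

def solution (arr : List Int) : Int := aLoop 100 arr 0

-- ===== PORT B =====
-- B's inner 'while True' per-element loop (fuel only for totality, as above)
def bCount : Nat → Int → Int
  | 0, _ => 0
  | fuel + 1, x =>
    let y := if x ≥ 50 ∧ PySem.Int.mod x 2 = 0 then PySem.Int.floordiv x 2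
             else if x < 50 ∧ PySem.Int.mod x 2 ≠ 0 then 2 * x + 1
             else x
    if y = x then 0 else 1 + bCount fuel y

def solution_alt (arr : List Int) : Int :=
  arr.foldl (fun best x => max best (bCount 100 x)) 0

-- ===== PRECONDITION & SPEC =====
-- A never returns (infinite while loop) when some element is odd and < 1
-- (odd negatives keep shrinking, and -1 is rewritten to itself with q += 1
-- every pass); Pre_ excludes exactly those inputs.
def Pre_solution (arr : List Int) : Prop :=
  ∀ x ∈ arr, PySem.Int.mod x 2 ≠ 0 → 1 ≤ x
instance (arr : List Int) : Decidable (Pre_solution arr) := by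
  unfold Pre_solution; infer_instance

def pvWitness_solution : List Int := [100, 3, 0, 51]

def Spec_solution (arr : List Int) (out : Int) : Prop := out = solution_alt arr
instance (arr : List Int) (out : Int) : Decidable (Spec_solution arr out) := by unfold Spec_solution; infer_instance

-- ===== CLAIM (what is proved, stated in full; the proofs are below) =====
def Claim_equal_solution : Prop := ∀ (arr : List Int), Dom_solution arr → Pre_solution arr → Spec_solution arr (solution arr)

-- ===== LEMMAS AND PROOFS =====

-- the one-element transformation both programs iterate
def pvStep (x : Int) : Int :=
  if x ≥ 50 ∧ PySem.Int.mod x 2 = 0 then PySem.Int.floordiv x 2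
  else if x < 50 ∧ PySem.Int.mod x 2 ≠ 0 then 2 * x + 1
  else x

-- an element is "safe": odd elements are ≥ 1 and it fits the domain bound
def Safe (x : Int) : Prop := (PySem.Int.mod x 2 ≠ 0 → 1 ≤ x) ∧ x ≤ 2147483648

-- fixed after n steps
def Stab (x : Int) (n : Nat) : Prop := pvStep (pvStep^[n] x) = pvStep^[n] x

-- Nat-valued mirror of bCount, for the arithmetic
def cN : Nat → Int → Nat
  | 0, _ => 0
  | fuel + 1, x => if pvStep x = x then 0 else 1 + cN fuel (pvStep x)

-- mod/floordiv by 2 are emod/ediv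
theorem pvStep_eq (x : Int) :
    pvStep x = if x ≥ 50 ∧ x % 2 = 0 then x / 2
               else if x < 50 ∧ x % 2 ≠ 0 then 2 * x + 1 else x := by
  unfold pvStep
  rw [PySem.Int.mod_eq_emod_of_pos (by norm_num), PySem.Int.floordiv_eq_ediv_of_pos (by norm_num)]

theorem stab_of_fixed (x : Int) (h : pvStep x = x) (n : Nat) : Stab x n := by
  unfold Stab; rw [Function.iterate_fixed h, h]

theorem stab_succ (x : Int) (n : Nat) (h : Stab x n) : Stab x (n + 1) := by
  unfold Stab at *
  simp [Function.iterate_succ_apply', h]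

theorem stab_mono (x : Int) (n m : Nat) (hnm : n ≤ m) (h : Stab x n) : Stab x m := by
  induction m with
  | zero =>
    have : n = 0 := by omega
    exact this ▸ h
  | succ k ih =>
    rcases Nat.lt_or_ge n (k+1) with hlt | hge
    · exact stab_succ x k (ih (by omega))
    · have : n = k + 1 := by omega
      exact this ▸ h

theorem stab_step (x : Int) (n : Nat) (h : Stab x (n + 1)) : Stab (pvStep x) n := by
  unfold Stab at *
  rwa [Function.iterate_succ_apply] at h

theorem stab_of_step (x : Int) (n : Nat) (h : Stab (pvStep x) n) : Stab x (n + 1) := by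
  unfold Stab at *
  rwa [Function.iterate_succ_apply]

-- finite check: every x with 0 ≤ x < 50 stabilizes within 6 steps
theorem stab_small_nat : ∀ n : Nat, n < 50 → pvStep (pvStep^[6] ((n : Nat) : Int)) = pvStep^[6] ((n : Nat) : Int) := by decide

theorem stab_small (x : Int) (h0 : 0 ≤ x) (h1 : x < 50) : Stab x 6 := by
  have hx : x = ((x.toNat : Nat) : Int) := by omega
  unfold Stab
  rw [hx]
  exact stab_small_nat x.toNat (by omega)

-- halving phase: even x with 50 ≤ x ≤ 2^b stabilizes within b+7 steps
theorem stab_big : ∀ b : Nat, ∀ x : Int, 50 ≤ x → x ≤ 2 ^ b → x % 2 = 0 → Stab x (b + 7) := by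
  intro b
  induction b with
  | zero => intro x h50 hb _; norm_num at hb; omega
  | succ b ih =>
    intro x h50 hb hev
    have hstep : pvStep x = x / 2 := by
      rw [pvStep_eq]; simp [h50, hev]
    have hy50 : 25 ≤ x / 2 := by omega
    have hpow : (2 : Int) ^ (b + 1) = 2 * 2 ^ b := by ring
    have hyb : x / 2 ≤ 2 ^ b := by omega
    by_cases hlt : x / 2 < 50
    · have h6 : Stab (x / 2) 6 := stab_small _ (by omega) hlt
      have h7 : Stab x 7 := stab_of_step x 6 (hstep ▸ h6)
      exact stab_mono x 7 (b + 1 + 7) (by omega) h7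
    · by_cases hodd : x / 2 % 2 = 0
      · have hrec := ih (x / 2) (by omega) hyb hodd
        have : Stab x (b + 7 + 1) := stab_of_step x (b + 7) (hstep ▸ hrec)
        exact stab_mono x (b + 7 + 1) (b + 1 + 7) (by omega) this
      · have hfix : pvStep (x / 2) = x / 2 := by
          rw [pvStep_eq]
          rw [if_neg (by omega), if_neg (by omega)]
        have : Stab x 1 := stab_of_step x 0 (hstep ▸ stab_of_fixed _ hfix 0)
        exact stab_mono x 1 (b + 1 + 7) (by omega) this

theorem safe_stab (x : Int) (h : Safe x) : Stab x 38 := by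
  obtain ⟨hodd, hbound⟩ := h
  rw [PySem.Int.mod_eq_emod_of_pos (by norm_num)] at hodd
  by_cases hev : x % 2 = 0
  · by_cases h50 : 50 ≤ x
    · have hpow : (2 : Int) ^ (31 : Nat) = 2147483648 := by norm_num
      exact stab_big 31 x h50 (by omega) hev
    · have hfix : pvStep x = x := by
        rw [pvStep_eq]
        rw [if_neg (by omega), if_neg (by omega)]
      exact stab_of_fixed x hfix 38
  · have h1 : 1 ≤ x := hodd hev
    by_cases h50 : x < 50
    · exact stab_mono x 6 38 (by omega) (stab_small x (by omega) h50)
    · have hfix : pvStep x = x := by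
        rw [pvStep_eq]
        rw [if_neg (by omega), if_neg (by omega)]
      exact stab_of_fixed x hfix 38

theorem safe_step (x : Int) (h : Safe x) : Safe (pvStep x) := by
  obtain ⟨hodd, hbound⟩ := h
  rw [PySem.Int.mod_eq_emod_of_pos (by norm_num)] at hodd
  unfold Safe
  rw [PySem.Int.mod_eq_emod_of_pos (by norm_num), pvStep_eq]
  split_ifs with h1 h2
  · constructor
    · intro; omega
    · omega
  · constructor
    · intro; omega
    · have : x < 50 := h2.1
      omega
  · exact ⟨fun hh => hodd hh, hbound⟩

-- cN does not depend on the fuel once it exceeds a stabilization bound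
theorem cN_fuel : ∀ (n : Nat) (x : Int) (f f' : Nat), Stab x n → n < f → n < f' →
    cN f x = cN f' x := by
  intro n
  induction n with
  | zero =>
    intro x f f' hs hf hf'
    obtain ⟨a, rfl⟩ : ∃ a, f = a + 1 := ⟨f - 1, by omega⟩
    obtain ⟨a', rfl⟩ : ∃ a', f' = a' + 1 := ⟨f' - 1, by omega⟩
    have hfix : pvStep x = x := hs
    simp [cN, hfix]
  | succ m ih =>
    intro x f f' hs hf hf'
    obtain ⟨a, rfl⟩ : ∃ a, f = a + 1 := ⟨f - 1, by omega⟩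
    obtain ⟨a', rfl⟩ : ∃ a', f' = a' + 1 := ⟨f' - 1, by omega⟩
    by_cases hfix : pvStep x = x
    · simp [cN, hfix]
    · have hs' : Stab (pvStep x) m := stab_step x m hs
      simp only [cN, if_neg hfix]
      rw [ih (pvStep x) a a' hs' (by omega) (by omega)]

theorem cN_zero_of_fixed (x : Int) (f : Nat) (h : pvStep x = x) : cN (f + 1) x = 0 := by
  simp [cN, h]

theorem cN_pos_of_unfixed (x : Int) (f : Nat) (h : pvStep x ≠ x) : 1 ≤ cN (f + 1) x := by
  simp [cN, h]

-- the per-element count drops by one (Nat subtraction) under one step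
theorem kk_step (x : Int) (h : Safe x) : cN 100 (pvStep x) = cN 100 x - 1 := by
  by_cases hfix : pvStep x = x
  · rw [hfix, cN_zero_of_fixed x 99 hfix]
  · have h38 : Stab (pvStep x) 38 := safe_stab _ (safe_step x h)
    have hrec : cN 100 x = 1 + cN 99 (pvStep x) := by
      show cN (99 + 1) x = _
      conv_lhs => rw [cN]
      rw [if_neg hfix]
    rw [hrec, cN_fuel 38 (pvStep x) 100 99 h38 (by omega) (by omega)]
    omega

-- A's pass is 'map pvStep' and q counts the changed elements
theorem aPass_eq : ∀ l : List Int, (∀ x ∈ l, PySem.Int.mod x 2 ≠ 0 → 1 ≤ x) →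
    aPass l = (l.map pvStep, ((l.countP (fun x => pvStep x != x) : Nat) : Int)) := by
  intro l
  induction l with
  | nil => intro _; simp [aPass]
  | cons x xs ih =>
    intro h
    have hx := h x (by simp)
    have hxs := fun y hy => h y (List.mem_cons_of_mem _ hy)
    simp only [aPass, ih hxs]
    have hm2 : PySem.Int.mod x 2 = x % 2 := PySem.Int.mod_eq_emod_of_pos (by norm_num)
    have hd2 : PySem.Int.floordiv x 2 = x / 2 := PySem.Int.floordiv_eq_ediv_of_pos (by norm_num)
    rw [hm2] at hx
    by_cases h1 : x ≥ 50 ∧ PySem.Int.mod x 2 = 0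
    · have hsx : pvStep x = x / 2 := by
        rw [pvStep_eq]; rw [hm2] at h1; simp [h1]
      have hne : pvStep x ≠ x := by rw [hsx]; rw [hm2] at h1; omega
      rw [if_pos h1]
      simp only [Prod.mk.injEq, List.map_cons, List.countP_cons, bne_iff_ne, ne_eq, hne,
        not_false_eq_true, if_true]
      refine ⟨by rw [hsx, hd2], ?_⟩
      push_cast
      ring
    · by_cases h2 : x < 50 ∧ PySem.Int.mod x 2 ≠ 0
      · have hx1 : 1 ≤ x := hx (by rw [← hm2]; exact h2.2)
        have hsx : pvStep x = 2 * x + 1 := by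
          rw [pvStep_eq]; rw [hm2] at h1 h2
          rw [if_neg (by tauto), if_pos h2]
        have hne : pvStep x ≠ x := by rw [hsx]; omega
        rw [if_neg h1, if_pos h2]
        simp only [Prod.mk.injEq, List.map_cons, List.countP_cons, bne_iff_ne, ne_eq, hne,
          not_false_eq_true, if_true]
        refine ⟨by rw [hsx], ?_⟩
        push_cast
        ring
      · have hsx : pvStep x = x := by
          unfold pvStep; rw [if_neg h1, if_neg h2]
        rw [if_neg h1, if_neg h2]
        simp [hsx]

-- foldl-max toolkit
theorem le_foldl_max : ∀ (l : List Int) (acc : Nat),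
    acc ≤ l.foldl (fun b x => max b (cN 100 x)) acc := by
  intro l
  induction l with
  | nil => intro acc; simp
  | cons x xs ih =>
    intro acc
    exact le_trans (le_max_left _ _) (ih (max acc (cN 100 x)))

theorem mem_le_foldl_max : ∀ (l : List Int) (acc : Nat) (x : Int), x ∈ l →
    cN 100 x ≤ l.foldl (fun b x => max b (cN 100 x)) acc := by
  intro l
  induction l with
  | nil => intro _ _ h; simp at h
  | cons y ys ih =>
    intro acc x hx
    rcases List.mem_cons.mp hx with rfl | hmem
    · exact le_trans (le_max_right acc _) (le_foldl_max ys _)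
    · exact ih _ x hmem

theorem foldl_max_map (l : List Int) : (∀ x ∈ l, Safe x) → ∀ acc : Nat,
    (l.map pvStep).foldl (fun b x => max b (cN 100 x)) (acc - 1)
      = l.foldl (fun b x => max b (cN 100 x)) acc - 1 := by
  induction l with
  | nil => intro _ acc; simp
  | cons x xs ih =>
    intro h acc
    have hx := h x (by simp)
    have hxs := fun y hy => h y (List.mem_cons_of_mem _ hy)
    simp only [List.map_cons, List.foldl_cons]
    rw [kk_step x hx]
    have hmax : max (acc - 1) (cN 100 x - 1) = max acc (cN 100 x) - 1 := by omega
    rw [hmax, ih hxs (max acc (cN 100 x))]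

theorem foldl_max_zero (l : List Int) (h : ∀ x ∈ l, pvStep x = x) :
    ∀ acc : Nat, l.foldl (fun b x => max b (cN 100 x)) acc = acc := by
  induction l with
  | nil => intro acc; rfl
  | cons x xs ih =>
    intro acc
    have hx : cN 100 x = 0 := cN_zero_of_fixed x 99 (h x (by simp))
    simp only [List.foldl_cons, hx, Nat.max_zero]
    exact ih (fun y hy => h y (List.mem_cons_of_mem _ hy)) acc

-- the main loop lemma: A's pass loop computes the maximum per-element count
theorem aLoop_eq : ∀ (N fuel : Nat) (arr : List Int) (answer : Int),
    (∀ x ∈ arr, Safe x) → (∀ x ∈ arr, Stab x N) → N < fuel →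
    aLoop fuel arr answer
      = answer + ((arr.foldl (fun b x => max b (cN 100 x)) 0 : Nat) : Int) := by
  intro N
  induction N with
  | zero =>
    intro fuel arr answer hsafe hstab hf
    obtain ⟨f, rfl⟩ : ∃ f, fuel = f + 1 := ⟨fuel - 1, by omega⟩
    have hfix : ∀ x ∈ arr, pvStep x = x := fun x hx => hstab x hx
    have hcnt : arr.countP (fun x => pvStep x != x) = 0 := by
      rw [List.countP_eq_zero]
      intro x hx
      simp [hfix x hx]
    simp only [aLoop, aPass_eq arr (fun x hx hh => (hsafe x hx).1 hh), hcnt]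
    rw [foldl_max_zero arr hfix 0]
    simp
  | succ M ih =>
    intro fuel arr answer hsafe hstab hf
    obtain ⟨f, rfl⟩ : ∃ f, fuel = f + 1 := ⟨fuel - 1, by omega⟩
    simp only [aLoop, aPass_eq arr (fun x hx hh => (hsafe x hx).1 hh)]
    by_cases hq : arr.countP (fun x => pvStep x != x) = 0
    · have hfix : ∀ x ∈ arr, pvStep x = x := by
        intro x hx
        have := List.countP_eq_zero.mp hq x hx
        simpa using this
      rw [foldl_max_zero arr hfix 0]
      simp [hq]
    · have hq' : 0 < arr.countP (fun x => pvStep x != x) := Nat.pos_of_ne_zero hq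
      have hcond : ((arr.countP (fun x => pvStep x != x) : Nat) : Int) > 0 := by
        exact_mod_cast hq'
      rw [if_pos hcond]
      have hsafe' : ∀ y ∈ arr.map pvStep, Safe y := by
        intro y hy
        obtain ⟨x, hx, rfl⟩ := List.mem_map.mp hy
        exact safe_step x (hsafe x hx)
      have hstab' : ∀ y ∈ arr.map pvStep, Stab y M := by
        intro y hy
        obtain ⟨x, hx, rfl⟩ := List.mem_map.mp hy
        exact stab_step x M (hstab x hx)
      rw [ih f (arr.map pvStep) (answer + 1) hsafe' hstab' (by omega)]
      have hmap := foldl_max_map arr hsafe 0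
      simp only [Nat.zero_sub] at hmap
      rw [hmap]
      obtain ⟨x0, hx0mem, hx0⟩ := List.countP_pos_iff.mp hq'
      have hx0ne : pvStep x0 ≠ x0 := by simpa using hx0
      have h1 : 1 ≤ cN 100 x0 := cN_pos_of_unfixed x0 99 hx0ne
      have hge : 1 ≤ arr.foldl (fun b x => max b (cN 100 x)) 0 :=
        le_trans h1 (mem_le_foldl_max arr 0 x0 hx0mem)
      omega

-- B's port computes the same foldl over the Nat counts
theorem bCount_eq_cN : ∀ (f : Nat) (x : Int), bCount f x = ((cN f x : Nat) : Int) := by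
  intro f
  induction f with
  | zero => intro x; rfl
  | succ g ih =>
    intro x
    show (if pvStep x = x then (0:Int) else 1 + bCount g (pvStep x)) = _
    by_cases h : pvStep x = x
    · simp [cN, h]
    · simp only [cN, if_neg h, ih (pvStep x)]
      push_cast
      omega

theorem solution_alt_eq_nat : ∀ (l : List Int) (n : Nat),
    l.foldl (fun best x => max best (bCount 100 x)) ((n : Nat) : Int)
      = ((l.foldl (fun b x => max b (cN 100 x)) n : Nat) : Int) := by
  intro l
  induction l with
  | nil => intro n; rfl
  | cons x xs ih =>
    intro n
    rw [List.foldl_cons, List.foldl_cons]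
    have hmax : max ((n : Nat) : Int) (bCount 100 x) = (((max n (cN 100 x)) : Nat) : Int) := by
      rw [bCount_eq_cN]
      exact (Nat.cast_max _ _).symm
    rw [hmax]
    exact ih _

-- ===== VERDICT (by name: the statement is the Claim_ definition above) =====
theorem solution_spec : Claim_equal_solution := by
  intro arr hdom hpre
  unfold Spec_solution solution solution_alt
  have hsafe : ∀ x ∈ arr, Safe x := by
    intro x hx
    refine ⟨hpre x hx, ?_⟩
    have := List.all_eq_true.mp hdom x hx
    simp [pvDomInt] at this
    omega
  have hstab : ∀ x ∈ arr, Stab x 99 :=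
    fun x hx => stab_mono x 38 99 (by omega) (safe_stab x (hsafe x hx))
  rw [aLoop_eq 99 100 arr 0 hsafe hstab (by omega)]
  have hb := solution_alt_eq_nat arr 0
  simp only [Nat.cast_zero] at hb
  rw [hb]
  simp
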